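-- pv_equiv track=rewrite | github.com/akhil2308/my-learning | leveling-system-solutions/Count Number of Bad Pairs.py | countBadPairs_v1
-- ===== SOURCE A (Python) =====
-- from typing import List
--
-- def countBadPairs_v1(nums: List[int]) -> int:
--     res = 0
--     nums_len = len(nums)
--     for i in range(nums_len -1):
--         for j in range(i+1, nums_len):
--             if j - i != nums[j] - nums[i]:
--                 res +=1
--
--     return res
-- ===== SOURCE B (Python) =====
-- from typing import List
--
-- def countBadPairs_v1(nums: List[int]) -> int:
--     # total pairs minus good pairs; good pairs share the key nums[k] - k
--     n = len(nums)
--     good = 0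
--     count = {}
--     for k, x in enumerate(nums):
--         d = x - k
--         good += count.get(d, 0)
--         count[d] = count.get(d, 0) + 1
--     return n * (n - 1) // 2 - good
-- ===== Notes on version B (the rewrite author's own statement) =====
-- stated objective: faster
-- what changed: Replaces the quadratic double loop over index pairs with a single pass that counts good pairs via a hash map keyed on nums[k]-k and subtracts them from n*(n-1)/2.
import Mathlib
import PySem

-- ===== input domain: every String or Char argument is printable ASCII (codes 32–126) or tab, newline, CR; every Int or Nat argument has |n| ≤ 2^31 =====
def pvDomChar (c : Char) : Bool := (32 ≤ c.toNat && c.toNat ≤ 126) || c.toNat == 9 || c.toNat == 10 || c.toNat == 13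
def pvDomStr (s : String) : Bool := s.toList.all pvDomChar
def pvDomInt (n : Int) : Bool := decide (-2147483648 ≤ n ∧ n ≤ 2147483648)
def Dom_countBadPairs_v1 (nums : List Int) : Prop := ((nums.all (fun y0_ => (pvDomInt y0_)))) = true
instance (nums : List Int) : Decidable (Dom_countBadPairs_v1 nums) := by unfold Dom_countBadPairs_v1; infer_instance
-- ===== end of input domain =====

-- B replaces A's quadratic double loop with one pass counting good pairs (key nums[k]-k) in a dict, returning n*(n-1)/2 minus them (asymptotically faster).

-- ===== PORT A =====
def countBadPairs_v1 (nums : List Int) : Int :=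
  let numsLen : Int := PySem.List.len nums
  (PySem.List.pyRange 0 (numsLen - 1)).foldl (fun res i =>
    (PySem.List.pyRange (i + 1) numsLen).foldl (fun res j =>
      if j - i ≠ PySem.List.pyGetD nums j 0 - PySem.List.pyGetD nums i 0 then res + 1 else res) res) 0

-- ===== PORT B =====
-- the 'for k, x in enumerate(nums)' loop of Source B, carrying (count, good) as state
def bLoop : List Int → Int → PySem.Dict Int Int → Int → Int
  | [], _, _, good => good
  | x :: xs, k, count, good =>
      let d := x - k
      bLoop xs (k + 1) (count.insert d (count.getD d 0 + 1)) (good + count.getD d 0)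

def countBadPairs_v1_alt (nums : List Int) : Int :=
  let n : Int := PySem.List.len nums
  let good := bLoop nums 0 PySem.Dict.empty 0
  PySem.Int.floordiv (n * (n - 1)) 2 - good

-- ===== PRECONDITION & SPEC =====
def Spec_countBadPairs_v1 (nums : List Int) (out : Int) : Prop := out = countBadPairs_v1_alt nums
instance (nums : List Int) (out : Int) : Decidable (Spec_countBadPairs_v1 nums out) := by unfold Spec_countBadPairs_v1; infer_instance

-- ===== CLAIM (what is proved, stated in full; the proofs are below) =====
def Claim_equal_countBadPairs_v1 : Prop := ∀ (nums : List Int), Dom_countBadPairs_v1 nums → Spec_countBadPairs_v1 nums (countBadPairs_v1 nums)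

-- ===== LEMMAS AND PROOFS =====

-- the list of keys nums[m] - (k + m)
def keysOf : List Int → Int → List Int
  | [], _ => []
  | x :: xs, k => (x - k) :: keysOf xs (k + 1)

-- number of pairs i < j with unequal / equal keys
def neCount : List Int → Nat
  | [] => 0
  | a :: l => l.countP (fun v => v ≠ a) + neCount l

def eqCount : List Int → Nat
  | [] => 0
  | a :: l => l.count a + eqCount l

lemma keysOf_length (nums : List Int) : ∀ (k : Int), (keysOf nums k).length = nums.length := by
  induction nums with
  | nil => intro k; rfl
  | cons x xs ih => intro k; simp [keysOf, ih]

lemma keysOf_getD (nums : List Int) : ∀ (m : Nat) (k : Int), m < nums.length →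
    (keysOf nums k).getD m 0 = nums.getD m 0 - (k + m) := by
  induction nums with
  | nil => intro m k h; simp at h
  | cons x xs ih =>
      intro m k h
      cases m with
      | zero => simp [keysOf]
      | succ m =>
          simp only [keysOf, List.getD_cons_succ]
          rw [ih m (k + 1) (by simpa using h)]
          push_cast; ring

lemma countP_ne_add_count (l : List Int) (a : Int) :
    l.countP (fun v => v ≠ a) + l.count a = l.length := by
  induction l with
  | nil => simp
  | cons b t ih =>
      simp only [List.countP_cons, List.count_cons, List.length_cons]
      by_cases h : b = a <;> simp [h] at ih ⊢ <;> omega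

-- A's inner loop counts the keys unequal to key i among positions after i
lemma A_inner (nums : List Int) (i : Int) (h0 : 0 ≤ i) (h1 : i < nums.length) (res : Int) :
    (PySem.List.pyRange (i + 1) (PySem.List.len nums)).foldl (fun res j =>
      if j - i ≠ PySem.List.pyGetD nums j 0 - PySem.List.pyGetD nums i 0 then res + 1 else res) res
    = res + ((keysOf nums 0).drop (i + 1).toNat).countP
        (fun v => v ≠ PySem.List.pyGetD (keysOf nums 0) i 0) := by
  have hcong : ∀ (acc : Int), ∀ j ∈ PySem.List.pyRange (i + 1) (PySem.List.len nums),
      (if j - i ≠ PySem.List.pyGetD nums j 0 - PySem.List.pyGetD nums i 0 then acc + 1 else acc)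
      = (if PySem.List.pyGetD (keysOf nums 0) j 0 ≠ PySem.List.pyGetD (keysOf nums 0) i 0 then acc + 1 else acc) := by
    intro acc j hj
    rw [PySem.List.mem_pyRange_one] at hj
    have hjlen : j < (nums.length : Int) := by simpa [PySem.List.len] using hj.2
    obtain ⟨m, rfl⟩ : ∃ m : Nat, j = (m : Int) := ⟨j.toNat, by omega⟩
    obtain ⟨mi, rfl⟩ : ∃ m : Nat, i = (m : Int) := ⟨i.toNat, by omega⟩
    have hm : m < nums.length := by exact_mod_cast hjlen
    have hmi : mi < nums.length := by exact_mod_cast h1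
    rw [PySem.List.pyGetD_natCast, PySem.List.pyGetD_natCast,
        PySem.List.pyGetD_natCast, PySem.List.pyGetD_natCast]
    rw [keysOf_getD nums m 0 hm, keysOf_getD nums mi 0 hmi]
    have hiff : ((m : Int) - mi ≠ nums.getD m 0 - nums.getD mi 0)
        ↔ (nums.getD m 0 - (0 + m) ≠ nums.getD mi 0 - (0 + mi)) := by
      constructor <;> intro hne he <;> apply hne <;> omega
    exact if_congr hiff rfl rfl
  rw [PySem.List.foldl_congr_mem _ _ _ res hcong]
  have hlenK : PySem.List.len nums = PySem.List.len (keysOf nums 0) := by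
    simp [PySem.List.len, keysOf_length]
  rw [hlenK]
  rw [PySem.List.foldl_pyRange_pyGetD (keysOf nums 0) 0
      (fun acc v => if v ≠ PySem.List.pyGetD (keysOf nums 0) i 0 then acc + 1 else acc) res
      (by omega : (0:Int) ≤ i + 1)]
  have hc := PySem.List.foldl_count_if
      (fun v => decide (v ≠ PySem.List.pyGetD (keysOf nums 0) i 0))
      ((keysOf nums 0).drop (i + 1).toNat) res
  simp only [decide_eq_true_eq] at hc
  exact hc

lemma sum_cnt (K : List Int) :
    ((List.range (K.length - 1)).map
      (fun m => (((K.drop (m + 1)).countP (fun v => v ≠ K.getD m 0) : Nat) : Int))).sum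
    = (neCount K : Int) := by
  induction K with
  | nil => simp [neCount]
  | cons a l ih =>
      cases l with
      | nil => simp [neCount]
      | cons b t =>
          simp only [List.length_cons, Nat.add_sub_cancel] at ih ⊢
          rw [List.range_succ_eq_map]
          simp only [List.map_cons, List.sum_cons, List.map_map]
          rw [neCount]
          push_cast
          rw [← ih]
          have hmap : (List.range t.length).map
              ((fun m => (((a :: b :: t : List Int).drop (m + 1)).countP
                (fun v => v ≠ (a :: b :: t : List Int).getD m 0) : Int)) ∘ Nat.succ)
              = (List.range t.length).map
                (fun m => ((((b :: t) : List Int).drop (m + 1)).countP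
                  (fun v => v ≠ ((b :: t) : List Int).getD m 0) : Int)) := by
            apply List.map_congr_left
            intro m _
            simp [Function.comp, List.drop_succ_cons]
          rw [hmap]
          simp

lemma A_eq (nums : List Int) : countBadPairs_v1 nums = (neCount (keysOf nums 0) : Int) := by
  cases hnil : nums with
  | nil => decide
  | cons y ys =>
      simp only [countBadPairs_v1]
      rw [← hnil]
      have hpos : 1 ≤ nums.length := by rw [hnil]; exact Nat.succ_le_succ (Nat.zero_le _)
      have hlen : PySem.List.len nums = (nums.length : Int) := by simp [PySem.List.len]
      have hsub : (nums.length : Int) - 1 = ((nums.length - 1 : Nat) : Int) := by omega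
      rw [hlen, hsub, PySem.List.pyRange_zero_natCast, List.foldl_map]
      have hcong2 : ∀ (acc : Int), ∀ m ∈ List.range (nums.length - 1),
          ((PySem.List.pyRange ((m : Int) + 1) (PySem.List.len nums)).foldl (fun res j =>
            if (j : Int) - m ≠ PySem.List.pyGetD nums j 0 - PySem.List.pyGetD nums m 0
            then res + 1 else res) acc)
          = acc + (((keysOf nums 0).drop (m + 1)).countP
              (fun v => v ≠ (keysOf nums 0).getD m 0) : Int) := by
        intro acc m hm
        have hm' : m < nums.length - 1 := List.mem_range.mp hm
        have h1 : (m : Int) < nums.length := by omega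
        rw [A_inner nums m (by omega) h1 acc]
        have ht : ((m : Int) + 1).toNat = m + 1 := by omega
        rw [ht, PySem.List.pyGetD_natCast]
      rw [hlen] at hcong2
      rw [PySem.List.foldl_congr_mem _ _ _ 0 hcong2]
      rw [PySem.List.foldl_add]
      rw [zero_add]
      have := sum_cnt (keysOf nums 0)
      rwa [keysOf_length nums 0] at this

lemma bLoop_eq (nums : List Int) : ∀ (k : Int) (prev : List Int) (cnt : PySem.Dict Int Int) (g : Int),
    (∀ v, cnt.getD v 0 = (prev.count v : Int)) →
    bLoop nums k cnt g = g + (eqCount (keysOf nums k) : Int)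
      + ((keysOf nums k).map (fun x => (prev.count x : Int))).sum := by
  induction nums with
  | nil => intro k prev cnt g h; simp [bLoop, keysOf, eqCount]
  | cons x xs ih =>
      intro k prev cnt g h
      simp only [bLoop, keysOf]
      rw [ih (k + 1) (prev ++ [x - k]) _ _ (by
        intro v
        rw [PySem.Dict.getD_insert]
        by_cases hv : v = x - k
        · simp [hv, h, List.count_append]
        · have hv' : ¬(x - k = v) := fun he => hv he.symm
          simp [hv, hv', h, List.count_append, List.count_nil])]
      simp only [eqCount, List.map_cons, List.sum_cons]
      rw [h (x - k)]
      have hsplit : ((keysOf xs (k + 1)).map (fun y => ((prev ++ [x - k]).count y : Int))).sum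
          = ((keysOf xs (k + 1)).map (fun y => (prev.count y : Int))).sum
            + ((keysOf xs (k + 1)).count (x - k) : Int) := by
        have h1 : ((keysOf xs (k + 1)).map (fun y => ((prev ++ [x - k]).count y : Int)))
            = ((keysOf xs (k + 1)).map (fun y =>
                (prev.count y : Int) + (if (fun y => y == x - k) y = true then 1 else 0))) := by
          apply List.map_congr_left
          intro y _
          by_cases hy : y = x - k
          · simp [List.count_append, hy]
          · have hy' : ¬(x - k = y) := fun he => hy he.symm
            simp [List.count_append, List.count_nil, hy, hy']
        rw [h1, PySem.List.sum_map_add_int, PySem.List.sum_map_ite_one_zero]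
        congr 1
      rw [hsplit]
      push_cast
      ring

lemma bLoop_good (nums : List Int) :
    bLoop nums 0 PySem.Dict.empty 0 = (eqCount (keysOf nums 0) : Int) := by
  have h := bLoop_eq nums 0 [] PySem.Dict.empty 0
    (by intro v; simp [PySem.Dict.getD, PySem.Dict.get?, PySem.Dict.empty])
  simpa using h

lemma two_mul_ne_add_eq (K : List Int) :
    2 * ((neCount K : Int) + (eqCount K : Int)) = (K.length : Int) * ((K.length : Int) - 1) := by
  induction K with
  | nil => simp [neCount, eqCount]
  | cons a l ih =>
      have hpc := countP_ne_add_count l a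
      have hpc' : ((l.countP (fun v => v ≠ a) : Int)) + (l.count a : Int) = (l.length : Int) := by
        exact_mod_cast hpc
      simp only [neCount, eqCount, List.length_cons]
      push_cast
      simp only [ne_eq, decide_not] at hpc' ⊢
      linear_combination 2 * hpc' + ih

-- ===== VERDICT (by name: the statement is the Claim_ definition above) =====
theorem countBadPairs_v1_spec : Claim_equal_countBadPairs_v1 := by
  intro nums _
  unfold Spec_countBadPairs_v1 countBadPairs_v1_alt
  rw [A_eq nums]
  simp only [bLoop_good nums]
  rw [PySem.Int.floordiv_eq_ediv_of_pos (by norm_num)]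
  have hlen : (PySem.List.len nums : Int) = ((keysOf nums 0).length : Int) := by
    simp [PySem.List.len, keysOf_length]
  rw [hlen]
  have h := two_mul_ne_add_eq (keysOf nums 0)
  have h2 : ((keysOf nums 0).length : Int) * (((keysOf nums 0).length : Int) - 1)
      = 2 * ((neCount (keysOf nums 0) : Int) + (eqCount (keysOf nums 0) : Int)) := h.symm
  rw [h2, Int.mul_ediv_cancel_left _ (by norm_num)]
  ring
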